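-- pv_equiv track=rewrite | github.com/jiya-manchanda/BiblioSearch | SourceMatcher.py | find_bibliography_start
-- ===== SOURCE A (Python) =====
-- def find_bibliography_start(content):
--   """
--   Find the starting index of the bibliography section in the content.
--
--   Arguments:
--   content (str): The content of a file.
--
--   Returns:
--   int: The starting index of the bibliography section.
--   """
--
--   # Define possible keywords indicating the start of the bibliography section
--   keywords = ['bibliography', 'works cited', 'references', 'citations']
--
--   # Find the index of the first occurrence of any of the keywords
--   index = -1
--   for keyword in keywords:
--     start_index = content.lower().find(keyword)
--     if start_index != -1 and (index == -1 or start_index < index):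
--       index = start_index
--
--   return index
-- ===== SOURCE B (Python) =====
-- def find_bibliography_start(content):
--   """
--   Find the starting index of the bibliography section in the content.
--
--   Single left-to-right scan: return the first index at which any keyword
--   starts in the lowercased content, -1 if none occurs.
--   """
--   keywords = ('bibliography', 'works cited', 'references', 'citations')
--   lowered = content.lower()
--   for i in range(len(lowered)):
--     if lowered.startswith(keywords, i):
--       return i
--   return -1
-- ===== Notes on version B (the rewrite author's own statement) =====
-- stated objective: simpler
-- what changed: B replaces A's four separate find() passes with running-minimum bookkeeping by one left-to-right scan that returns the first index where lowered.startswith(any keyword), using str.startswith's tuple form.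
import Mathlib
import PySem

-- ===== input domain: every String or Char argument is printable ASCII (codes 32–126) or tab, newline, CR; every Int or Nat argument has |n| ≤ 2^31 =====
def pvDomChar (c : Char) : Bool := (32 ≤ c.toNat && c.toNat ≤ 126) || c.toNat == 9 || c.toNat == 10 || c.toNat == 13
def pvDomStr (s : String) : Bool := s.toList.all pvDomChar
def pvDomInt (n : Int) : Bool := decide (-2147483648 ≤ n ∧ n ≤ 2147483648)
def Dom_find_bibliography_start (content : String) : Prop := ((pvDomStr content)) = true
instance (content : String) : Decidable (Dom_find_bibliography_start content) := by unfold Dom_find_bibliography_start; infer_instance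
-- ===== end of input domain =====

-- B replaces A's four find() passes + running minimum by one left-to-right scan returning the
-- first index where any keyword starts (objective: simpler).

-- ===== PORT A =====
def find_bibliography_start (content : String) : Int :=
  let keywords : List String := ["bibliography", "works cited", "references", "citations"]
  keywords.foldl
    (fun index keyword =>
      let start_index := PySem.Str.find (PySem.Str.lower content) keyword
      if start_index ≠ -1 ∧ (index = -1 ∨ start_index < index) then start_index else index)
    (-1)

-- ===== PORT B =====
-- the scan 'for i in range(len(lowered)): if lowered.startswith(keywords, i): return i',
-- as the structural recursion over the suffixes of the lowered character list
def pvScan (kws : List (List Char)) : List Char → Int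
  | [] => -1
  | c :: t =>
    if kws.any (fun k => PySem.Chars.startswith (c :: t) k) then 0
    else
      let r := pvScan kws t
      if r = -1 then -1 else r + 1

def find_bibliography_start_alt (content : String) : Int :=
  pvScan ["bibliography".toList, "works cited".toList, "references".toList, "citations".toList]
    (PySem.Str.lower content).toList

-- ===== PRECONDITION & SPEC =====
def Spec_find_bibliography_start (content : String) (out : Int) : Prop := out = find_bibliography_start_alt content
instance (content : String) (out : Int) : Decidable (Spec_find_bibliography_start content out) := by unfold Spec_find_bibliography_start; infer_instance

-- ===== CLAIM (what is proved, stated in full; the proofs are below) =====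
def Claim_equal_find_bibliography_start : Prop := ∀ (content : String), Dom_find_bibliography_start content → Spec_find_bibliography_start content (find_bibliography_start content)

-- ===== LEMMAS AND PROOFS =====

-- r is "the first index of s at which some keyword of kws starts, or -1 if none"
def GoodAt (kws : List (List Char)) (s : List Char) (r : Int) : Prop :=
  (r = -1 ∧ ∀ n : Nat, ∀ k ∈ kws, ¬ k <+: s.drop n)
  ∨ (∃ m : Nat, r = (m : Int) ∧ (∃ k ∈ kws, k <+: s.drop m) ∧
      ∀ j : Nat, j < m → ∀ k ∈ kws, ¬ k <+: s.drop j)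

theorem GoodAt_unique {kws : List (List Char)} {s : List Char} {r₁ r₂ : Int}
    (h₁ : GoodAt kws s r₁) (h₂ : GoodAt kws s r₂) : r₁ = r₂ := by
  rcases h₁ with ⟨e₁, n₁⟩ | ⟨m₁, e₁, ⟨k₁, hk₁, p₁⟩, min₁⟩ <;>
    rcases h₂ with ⟨e₂, n₂⟩ | ⟨m₂, e₂, ⟨k₂, hk₂, p₂⟩, min₂⟩
  · exact e₁.trans e₂.symm
  · exact absurd p₂ (n₁ m₂ k₂ hk₂)
  · exact absurd p₁ (n₂ m₁ k₁ hk₁)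
  · subst e₁ e₂
    rcases Nat.lt_trichotomy m₁ m₂ with h | h | h
    · exact absurd p₁ (min₂ m₁ h k₁ hk₁)
    · simp [h]
    · exact absurd p₂ (min₁ m₂ h k₂ hk₂)

-- a keyword that is a prefix of some suffix of s occurs in s, so find s k ≠ -1
theorem find_neg_one_no_prefix {s k : List Char} (hf : PySem.Chars.find s k = -1) :
    ∀ n : Nat, ¬ k <+: s.drop n := by
  intro n hp
  have hin : PySem.Chars.isIn k s = true :=
    (PySem.Chars.exists_prefix_drop_iff_isIn k s).mp ⟨n, hp⟩
  have : k <:+: s := (PySem.Chars.isIn_iff_infix k s).mp hin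
  exact (PySem.Chars.find_eq_neg_one_iff s k).mp hf this

-- one step of A's loop preserves the characterisation, extending the keyword set
theorem step_good (s : List Char) (K₀ : List (List Char)) (acc : Int) (k : List Char)
    (h : GoodAt K₀ s acc) :
    GoodAt (K₀ ++ [k]) s
      (if PySem.Chars.find s k ≠ -1 ∧ (acc = -1 ∨ PySem.Chars.find s k < acc)
       then PySem.Chars.find s k else acc) := by
  by_cases hf : PySem.Chars.find s k = -1
  · -- k occurs nowhere; the branch is not taken and acc keeps its meaning
    simp only [hf, ne_eq, not_true_eq_false, false_and, if_false]
    rcases h with ⟨e, hn⟩ | ⟨m, e, ⟨k', hk', p'⟩, hmin⟩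
    · refine Or.inl ⟨e, fun n k' hk' => ?_⟩
      rcases List.mem_append.mp hk' with h' | h'
      · exact hn n k' h'
      · simp only [List.mem_singleton] at h'; subst h'
        exact find_neg_one_no_prefix hf n
    · refine Or.inr ⟨m, e, ⟨k', List.mem_append.mpr (Or.inl hk'), p'⟩,
        fun j hj k'' hk'' => ?_⟩
      rcases List.mem_append.mp hk'' with h' | h'
      · exact hmin j hj k'' h'
      · simp only [List.mem_singleton] at h'; subst h'
        exact find_neg_one_no_prefix hf j
  · have hnn : 0 ≤ PySem.Chars.find s k := by
      have := PySem.Chars.neg_one_le_find s k; omega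
    obtain ⟨hpk, hmk⟩ := PySem.Chars.find_spec (s := s) (sub := k) hnn
    by_cases hc : acc = -1 ∨ PySem.Chars.find s k < acc
    · -- take the new, smaller index
      simp only [hf, ne_eq, not_false_eq_true, true_and, hc, if_true]
      refine Or.inr ⟨(PySem.Chars.find s k).toNat, (Int.toNat_of_nonneg hnn).symm,
        ⟨k, List.mem_append.mpr (Or.inr (List.mem_singleton.mpr rfl)), hpk⟩,
        fun j hj k'' hk'' => ?_⟩
      rcases List.mem_append.mp hk'' with h' | h'
      · rcases h with ⟨e, hn⟩ | ⟨m, e, _, hmin⟩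
        · exact hn j k'' h'
        · have hflt : PySem.Chars.find s k < acc := by
            rcases hc with hc | hc
            · rw [hc] at e; omega
            · exact hc
          have : j < m := by
            have : ((PySem.Chars.find s k).toNat : Int) < (m : Int) := by
              rw [Int.toNat_of_nonneg hnn]; omega
            omega
          exact hmin j this k'' h'
      · simp only [List.mem_singleton] at h'; subst h'
        exact hmk j hj
    · -- keep acc: acc ≤ find s k
      simp only [hf, ne_eq, not_false_eq_true, true_and, hc, if_false]
      push Not at hc
      obtain ⟨hacc, hle⟩ := hc
      rcases h with ⟨e, _⟩ | ⟨m, e, ⟨k', hk', p'⟩, hmin⟩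
      · exact absurd e hacc
      · refine Or.inr ⟨m, e, ⟨k', List.mem_append.mpr (Or.inl hk'), p'⟩,
          fun j hj k'' hk'' => ?_⟩
        rcases List.mem_append.mp hk'' with h' | h'
        · exact hmin j hj k'' h'
        · simp only [List.mem_singleton] at h'
          rw [h']
          apply hmk
          rw [e] at hle
          have := Int.toNat_of_nonneg hnn
          omega

-- B's scan satisfies the same characterisation (keywords are nonempty)
theorem scan_good (kws : List (List Char)) (hk : ∀ k ∈ kws, k ≠ []) :
    ∀ s : List Char, GoodAt kws s (pvScan kws s) := by
  intro s
  induction s with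
  | nil =>
    refine Or.inl ⟨rfl, fun n k hmem hp => ?_⟩
    simp only [List.drop_nil] at hp
    exact hk k hmem (List.prefix_nil.mp hp)
  | cons c t ih =>
    by_cases h0 : kws.any (fun k => PySem.Chars.startswith (c :: t) k) = true
    · rw [show pvScan kws (c :: t) = 0 by simp [pvScan, h0]]
      obtain ⟨k, hmem, hsw⟩ := List.any_eq_true.mp h0
      refine Or.inr ⟨0, rfl, ⟨k, hmem, ?_⟩, by omega⟩
      simpa using (PySem.Chars.startswith_iff (c :: t) k).mp hsw
    · have hnot0 : ∀ k ∈ kws, ¬ k <+: (c :: t) := by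
        intro k hmem hp
        exact h0 (List.any_eq_true.mpr ⟨k, hmem, (PySem.Chars.startswith_iff _ _).mpr hp⟩)
      rcases ih with ⟨e, hn⟩ | ⟨m, e, ⟨k', hk', p'⟩, hmin⟩
      · rw [show pvScan kws (c :: t) = -1 by simp [pvScan, h0, e]]
        refine Or.inl ⟨rfl, fun n k hmem => ?_⟩
        cases n with
        | zero => exact hnot0 k hmem
        | succ n => simpa using hn n k hmem
      · rw [show pvScan kws (c :: t) = (m : Int) + 1 by
          simp [pvScan, h0, e]]
        refine Or.inr ⟨m + 1, by push_cast; ring, ⟨k', hk', by simpa using p'⟩,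
          fun j hj k'' hk'' => ?_⟩
        cases j with
        | zero => exact hnot0 k'' hk''
        | succ j => simpa using hmin j (by omega) k'' hk''

-- A's result satisfies the characterisation for the four concrete keywords
theorem foldA_good (L : List Char) :
    GoodAt ["bibliography".toList, "works cited".toList, "references".toList, "citations".toList] L
      ([("bibliography" : String), "works cited", "references", "citations"].foldl
        (fun index keyword =>
          let f := PySem.Chars.find L keyword.toList
          if f ≠ -1 ∧ (index = -1 ∨ f < index) then f else index) (-1)) := by
  have h0 : GoodAt ([] : List (List Char)) L (-1) := Or.inl ⟨rfl, by simp⟩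
  have h1 := step_good L [] (-1) "bibliography".toList h0
  have h2 := step_good L _ _ "works cited".toList h1
  have h3 := step_good L _ _ "references".toList h2
  have h4 := step_good L _ _ "citations".toList h3
  simpa [List.foldl] using h4

-- ===== VERDICT (by name: the statement is the Claim_ definition above) =====
theorem find_bibliography_start_spec : Claim_equal_find_bibliography_start := by
  intro content _
  unfold Spec_find_bibliography_start find_bibliography_start find_bibliography_start_alt
  have hA := foldA_good (PySem.Str.lower content).toList
  have hB := scan_good
    ["bibliography".toList, "works cited".toList, "references".toList, "citations".toList]
    (by decide) (PySem.Str.lower content).toList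
  have := GoodAt_unique hA hB
  simpa [List.foldl] using this
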